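-- pv_equiv track=rewrite | github.com/AlexandrVelikiy/teremonline | teremonline_scr/teremonline_scr/spiders/santehgrad_spider.py | get_atributes
-- ===== SOURCE A (Python) =====
-- def get_atributes(haract,atributes_name_list):
--     # пробуем получить значения
--     name = []
--     znach = []
--     for i, value in enumerate(atributes_name_list):
--         v = value
--         if (i+1) % 2:
--             name.append(v)
--         else:
--             znach.append(v)
--
--     atribute = ''
--     for i in range(len(name)):
--         a = '|'.join([haract, name[i], znach[i]])
--         atribute = atribute + a + '\n'
--     return atribute.strip('\n')
-- ===== SOURCE B (Python) =====
-- def get_atributes(haract, atributes_name_list):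
--     lines = []
--     for i in range(0, len(atributes_name_list), 2):
--         lines.append('|'.join([haract, atributes_name_list[i], atributes_name_list[i + 1]]))
--     return '\n'.join(lines).strip('\n')
-- ===== Notes on version B (the rewrite author's own statement) =====
-- stated objective: simpler
-- what changed: Single pass stepping by 2 over the list joining each name/value pair directly and '\n'.join-ing the collected lines, instead of first splitting into two parity lists and then recombining by index with quadratic string concatenation.
import Mathlib
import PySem

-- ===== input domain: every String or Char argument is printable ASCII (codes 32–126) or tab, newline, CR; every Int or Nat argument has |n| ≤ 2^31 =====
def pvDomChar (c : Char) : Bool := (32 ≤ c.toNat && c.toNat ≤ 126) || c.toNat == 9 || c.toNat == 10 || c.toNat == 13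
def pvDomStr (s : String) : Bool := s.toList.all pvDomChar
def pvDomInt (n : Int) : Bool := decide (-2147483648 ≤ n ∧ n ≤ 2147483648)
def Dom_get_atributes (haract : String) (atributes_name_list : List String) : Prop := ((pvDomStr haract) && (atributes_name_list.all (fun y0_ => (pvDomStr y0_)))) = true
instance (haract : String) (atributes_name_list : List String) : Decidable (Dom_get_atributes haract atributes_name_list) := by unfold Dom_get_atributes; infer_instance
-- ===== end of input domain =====

-- B replaces A's two-phase parity split + index recombination with one pass over index pairs (simpler).
-- Pre_ excludes odd-length lists, on which both A and B raise IndexError.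


-- ===== PORT A =====
-- literal port of A; the pyGetD default "" is only reachable where Python raises IndexError
-- (odd-length list, excluded by Pre_)
def get_atributes (haract : String) (atributes_name_list : List String) : String :=
  let nz := (PySem.List.enumerate atributes_name_list).foldl
      (fun (p : List String × List String) iv =>
        if PySem.Int.mod (iv.1 + 1) 2 ≠ 0 then (p.1 ++ [iv.2], p.2)
        else (p.1, p.2 ++ [iv.2]))
      ([], [])
  let name := nz.1
  let znach := nz.2
  let atribute := (PySem.List.pyRange 0 (name.length : Int) 1).foldl
      (fun acc i =>
        let a := PySem.Str.join "|" [haract, PySem.List.pyGetD name i "", PySem.List.pyGetD znach i ""]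
        acc ++ a ++ "\n") ""
  PySem.Str.stripChars atribute "\n"

-- ===== PORT B =====
-- literal port of Source B; the pyGetD default "" is only reachable where Python raises IndexError
-- (odd-length list, excluded by Pre_)
def get_atributes_alt (haract : String) (atributes_name_list : List String) : String :=
  let lines := (PySem.List.pyRange 0 (atributes_name_list.length : Int) 2).foldl
      (fun acc i =>
        acc ++ [PySem.Str.join "|"
          [haract, PySem.List.pyGetD atributes_name_list i "",
           PySem.List.pyGetD atributes_name_list (i + 1) ""]]) []
  PySem.Str.stripChars (PySem.Str.join "\n" lines) "\n"

-- ===== PRECONDITION & SPEC =====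
-- Pre_ excludes odd-length lists: there A raises IndexError (znach[i] at the last i) and B raises IndexError too.
def Pre_get_atributes (haract : String) (atributes_name_list : List String) : Prop :=
  atributes_name_list.length % 2 = 0
instance (haract : String) (atributes_name_list : List String) : Decidable (Pre_get_atributes haract atributes_name_list) := by unfold Pre_get_atributes; infer_instance
def pvWitness_get_atributes : String × List String := ("Color", ["Weight", "3 kg"])
def Spec_get_atributes (haract : String) (atributes_name_list : List String) (out : String) : Prop := out = get_atributes_alt haract atributes_name_list
instance (haract : String) (atributes_name_list : List String) (out : String) : Decidable (Spec_get_atributes haract atributes_name_list out) := by unfold Spec_get_atributes; infer_instance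

-- ===== CLAIM (what is proved, stated in full; the proofs are below) =====
def Claim_equal_get_atributes : Prop := ∀ (haract : String) (atributes_name_list : List String), Dom_get_atributes haract atributes_name_list → Pre_get_atributes haract atributes_name_list → Spec_get_atributes haract atributes_name_list (get_atributes haract atributes_name_list)

-- ===== LEMMAS AND PROOFS =====

-- even-position and odd-position sublists
def pvEvens {α : Type} : List α → List α
  | [] => []
  | [a] => [a]
  | a :: _ :: r => a :: pvEvens r

def pvOdds {α : Type} : List α → List α
  | [] => []
  | [_] => []
  | _ :: b :: r => b :: pvOdds r

-- the haract|name|value lines, built directly from consecutive pairs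
def pvLines (h : String) : List String → List String
  | a :: b :: r => PySem.Str.join "|" [h, a, b] :: pvLines h r
  | _ => []

-- plain concatenation of a list of strings
def pvCat : List String → String
  | [] => ""
  | s :: r => s ++ pvCat r

-- A's first loop accumulates the two parity sublists
theorem pv_enum_fold (l : List String) :
    ∀ (s : Int) (n z : List String), 0 ≤ s → s % 2 = 0 →
      (PySem.List.enumerate l s).foldl
        (fun (p : List String × List String) iv =>
          if PySem.Int.mod (iv.1 + 1) 2 ≠ 0 then (p.1 ++ [iv.2], p.2)
          else (p.1, p.2 ++ [iv.2]))
        (n, z) = (n ++ pvEvens l, z ++ pvOdds l) := by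
  induction l using pvEvens.induct with
  | case1 => intro s n z _ _; simp [PySem.List.enumerate, pvEvens, pvOdds]
  | case2 a =>
    intro s n z hs he
    have h1 : PySem.Int.mod (s + 1) 2 ≠ 0 := by
      simp [PySem.Int.mod, Int.fmod_eq_emod]; omega
    simp only [PySem.List.enumerate_cons, PySem.List.enumerate, List.foldl_cons,
      List.foldl_nil, if_pos h1, pvEvens, pvOdds]
    simp
  | case3 a b r ih =>
    intro s n z hs he
    have h1 : PySem.Int.mod (s + 1) 2 ≠ 0 := by
      simp [PySem.Int.mod, Int.fmod_eq_emod]; omega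
    have h2 : ¬ (PySem.Int.mod (s + 1 + 1) 2 ≠ 0) := by
      simp [PySem.Int.mod, Int.fmod_eq_emod]; omega
    rw [PySem.List.enumerate_cons, PySem.List.enumerate_cons, List.foldl_cons,
      List.foldl_cons, if_pos h1, if_neg h2]
    rw [show s + 1 + 1 = s + 2 by ring]
    rw [ih (s + 2) (n ++ [a]) (z ++ [b]) (by omega) (by omega)]
    simp [pvEvens, pvOdds]

theorem pv_evens_len :
    ∀ (t : Nat) (l : List String), l.length = 2 * t → (pvEvens l).length = t := by
  intro t
  induction t with
  | zero => intro l hl; cases l with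
    | nil => simp [pvEvens]
    | cons a r => simp at hl
  | succ t ih =>
    intro l hl
    match l with
    | a :: b :: r =>
      simp only [pvEvens, List.length_cons]
      rw [ih r (by simp at hl; omega)]

-- skipping two head elements shifts a nonnegative index by 2
theorem pv_getD_shift2 {α : Type} (a b : α) (r : List α) (d : α) (i : Int) (hi : 0 ≤ i) :
    PySem.List.pyGetD (a :: b :: r) (i + 2) d = PySem.List.pyGetD r i d := by
  obtain ⟨n, rfl⟩ : ∃ n : Nat, i = (n : Int) := ⟨i.toNat, by omega⟩
  rw [show ((n : Int) + 2) = ((n + 2 : Nat) : Int) by push_cast; ring]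
  rw [PySem.List.pyGetD_natCast, PySem.List.pyGetD_natCast]
  simp

-- A's second loop, as a map over range, produces the pair lines
theorem pv_A_lines :
    ∀ (t : Nat) (l : List String) (h : String), l.length = 2 * t →
      (List.range t).map (fun k =>
        PySem.Str.join "|" [h, (pvEvens l).getD k "", (pvOdds l).getD k ""]) = pvLines h l := by
  intro t
  induction t with
  | zero => intro l h hl; cases l with
    | nil => simp [pvLines]
    | cons a r => simp at hl
  | succ t ih =>
    intro l h hl
    match l with
    | a :: b :: r =>
      have hr : r.length = 2 * t := by simp at hl; omega
      rw [List.range_succ_eq_map, List.map_cons, List.map_map]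
      simp only [pvEvens, pvOdds, pvLines]
      rw [List.cons_eq_cons]
      refine ⟨by simp, ?_⟩
      rw [← ih r h hr]
      apply List.map_congr_left
      intro k _
      simp

-- B's index loop, as a map over range, produces the same pair lines
theorem pv_B_lines :
    ∀ (t : Nat) (l : List String) (h : String), l.length = 2 * t →
      (List.range t).map (fun (k : Nat) =>
        PySem.Str.join "|" [h, PySem.List.pyGetD l (2 * (k : Int)) "",
          PySem.List.pyGetD l (2 * (k : Int) + 1) ""]) = pvLines h l := by
  intro t
  induction t with
  | zero => intro l h hl; cases l with
    | nil => simp [pvLines]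
    | cons a r => simp at hl
  | succ t ih =>
    intro l h hl
    match l with
    | a :: b :: r =>
      have hr : r.length = 2 * t := by simp at hl; omega
      rw [List.range_succ_eq_map, List.map_cons, List.map_map]
      simp only [pvLines]
      rw [List.cons_eq_cons]
      refine ⟨by norm_num [PySem.List.pyGetD_ofNat'], ?_⟩
      rw [← ih r h hr]
      apply List.map_congr_left
      intro k _
      simp only [Function.comp_apply]
      rw [show (2:Int) * ((Nat.succ k : Nat) : Int) = 2 * (k : Int) + 2 by push_cast; ring,
          show (2:Int) * (k : Int) + 2 + 1 = (2 * (k : Int) + 1) + 2 by ring,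
          pv_getD_shift2 a b r "" (2 * (k : Int)) (by positivity),
          pv_getD_shift2 a b r "" (2 * (k : Int) + 1) (by positivity)]

-- range(0, 2t, 2) is the doubled range
theorem pv_pyRange_two (t : Nat) :
    PySem.List.pyRange 0 ((2 * t : Nat) : Int) 2 = (List.range t).map (fun (k : Nat) => 2 * (k : Int)) := by
  rw [PySem.List.pyRange_of_pos _ _ (by norm_num)]
  cases t with
  | zero => simp
  | succ t =>
    rw [if_pos (by push_cast; omega)]
    rw [show ((((2 * (t+1) : Nat) : Int) - 0 + 2 - 1) / 2).toNat = t + 1 by push_cast; omega]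
    simp

-- the string-accumulating fold is plain concatenation
theorem pv_cat_fold (w : Int → String) :
    ∀ (R : List Int) (init : String),
      R.foldl (fun acc i => let a := w i; acc ++ a ++ "\n") init
        = init ++ pvCat (R.map (fun i => w i ++ "\n")) := by
  intro R
  induction R with
  | nil => intro init; simp [pvCat]
  | cons x r ih =>
    intro init
    rw [List.foldl_cons, ih]
    simp [pvCat, String.append_assoc]

-- the list-accumulating fold is a map
theorem pv_list_fold (w : Int → String) (R : List Int) :
    R.foldl (fun acc i => acc ++ [w i]) [] = R.map w := by
  rw [PySem.List.foldl_append_eq_flatMap]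
  induction R with
  | nil => rfl
  | cons x r ih => simp_all [List.flatMap_cons]

theorem pv_cat_toList (L : List String) :
    (pvCat L).toList = (L.map String.toList).flatten := by
  induction L with
  | nil => simp [pvCat]
  | cons s r ih => simp [pvCat, String.toList_append, ih]

-- flatten-with-trailing-newlines vs newline-intercalation
theorem pv_flatten_intercalate (M : List (List Char)) (hM : M ≠ []) :
    (M.map (· ++ ['\n'])).flatten = List.intercalate ['\n'] M ++ ['\n'] := by
  induction M with
  | nil => exact absurd rfl hM
  | cons x r ih =>
    cases r with
    | nil => simp [List.intercalate]
    | cons y s =>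
      rw [List.map_cons, List.flatten_cons, ih (by simp)]
      rw [show List.intercalate ['\n'] (x :: y :: s)
            = x ++ ['\n'] ++ List.intercalate ['\n'] (y :: s) by simp [List.intercalate]]
      simp [List.append_assoc]

-- stripping '\n' ignores one trailing '\n'
theorem pv_strip_snoc (cs : List Char) :
    PySem.Chars.stripChars (cs ++ ['\n']) ['\n'] = PySem.Chars.stripChars cs ['\n'] := by
  have hsc : ∀ ds : List Char, PySem.Chars.stripChars ds ['\n']
      = (List.dropWhile (fun c => List.contains ['\n'] c)
          (List.dropWhile (fun c => List.contains ['\n'] c) ds).reverse).reverse := fun _ => rfl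
  rw [hsc, hsc, List.dropWhile_append]
  by_cases hc : (List.dropWhile (fun c => List.contains ['\n'] c) cs).isEmpty = true
  · rw [if_pos hc]
    rw [List.isEmpty_iff] at hc
    rw [hc]
    simp [List.dropWhile]
  · rw [if_neg hc]
    rw [List.reverse_append]
    simp only [List.reverse_cons, List.reverse_nil, List.nil_append, List.singleton_append]
    rw [List.dropWhile_cons_of_pos (by simp)]

-- concat-with-newlines and newline-join agree after stripping '\n'
theorem pv_strip_eq (L : List String) :
    PySem.Str.stripChars (pvCat (L.map (· ++ "\n"))) "\n"
      = PySem.Str.stripChars (PySem.Str.join "\n" L) "\n" := by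
  have hA : (pvCat (L.map (· ++ "\n"))).toList
      = ((L.map String.toList).map (· ++ ['\n'])).flatten := by
    rw [pv_cat_toList, List.map_map, List.map_map]
    apply congrArg List.flatten
    apply List.map_congr_left
    intro s _
    show (s ++ "\n").toList = s.toList ++ ['\n']
    rw [String.toList_append]
    rfl
  have hB : (PySem.Str.join "\n" L).toList = List.intercalate ['\n'] (L.map String.toList) := by
    rw [PySem.Str.toList_join]
    rfl
  unfold PySem.Str.stripChars
  cases L with
  | nil => rfl
  | cons s r =>
    congr 1
    rw [hA, hB]
    rw [pv_flatten_intercalate _ (by simp)]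
    rw [show ("\n" : String).toList = ['\n'] from rfl, pv_strip_snoc]

theorem get_atributes_spec : Claim_equal_get_atributes := by
  intro h l _ hpre
  unfold Pre_get_atributes at hpre
  obtain ⟨t, ht⟩ : ∃ t, l.length = 2 * t := ⟨l.length / 2, by omega⟩
  unfold Spec_get_atributes get_atributes get_atributes_alt
  rw [pv_enum_fold l 0 [] [] (by norm_num) (by norm_num)]
  simp only [List.nil_append]
  rw [pv_cat_fold, pv_list_fold]
  rw [PySem.List.pyRange_one, Int.sub_zero, Int.toNat_natCast, pv_evens_len t l ht]
  rw [ht, pv_pyRange_two t, List.map_map, List.map_map]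
  have hAmap : (List.range t).map
      ((fun i => PySem.Str.join "|" [h, PySem.List.pyGetD (pvEvens l) i "",
          PySem.List.pyGetD (pvOdds l) i ""] ++ "\n") ∘ fun (k : Nat) => (0 : Int) + (k : Int))
      = (pvLines h l).map (· ++ "\n") := by
    rw [← pv_A_lines t l h ht, List.map_map]
    apply List.map_congr_left
    intro k _
    simp [PySem.List.pyGetD_natCast]
  have hBmap : (List.range t).map
      ((fun i => PySem.Str.join "|" [h, PySem.List.pyGetD l i "",
          PySem.List.pyGetD l (i + 1) ""]) ∘ fun (k : Nat) => 2 * (k : Int))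
      = pvLines h l := by
    rw [← pv_B_lines t l h ht]
    apply List.map_congr_left
    intro k _
    simp
  rw [hAmap, hBmap]
  exact pv_strip_eq (pvLines h l)
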